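-- pv_equiv track=rewrite | github.com/gumbrich/kondate | backend/providers/real_provider.py | _is_clearly_non_recipe
-- ===== SOURCE A (Python) =====
-- def _is_clearly_non_recipe(url: str) -> bool:
--     lower = url.lower()
--     bad_parts = [
--         "/search",
--         "/suche",
--         "/tag/",
--         "/tags/",
--         "/category/",
--         "/categories/",
--         "/kategorie/",
--         "/kategorien/",
--         "/author/",
--         "/page/",
--     ]
--     return any(part in lower for part in bad_parts)
-- ===== SOURCE B (Python) =====
-- _BAD_PARTS = (
--     "/search",
--     "/suche",
--     "/tag/",
--     "/tags/",
--     "/category/",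
--     "/categories/",
--     "/kategorie/",
--     "/kategorien/",
--     "/author/",
--     "/page/",
-- )
--
--
-- def _is_clearly_non_recipe(url: str) -> bool:
--     # Position-major single scan: walk the lowered URL once and at each
--     # position test whether any marker starts there.
--     lower = url.lower()
--     for i in range(len(lower)):
--         for part in _BAD_PARTS:
--             if lower.startswith(part, i):
--                 return True
--     return False
-- ===== Notes on version B (the rewrite author's own statement) =====
-- stated objective: alternative
-- what changed: Replaced A's ten independent whole-string substring-containment scans (pattern-major) by one position-major pass over the lowered URL that at each index tests whether any marker starts there, returning at the first hit.
import Mathlib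
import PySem

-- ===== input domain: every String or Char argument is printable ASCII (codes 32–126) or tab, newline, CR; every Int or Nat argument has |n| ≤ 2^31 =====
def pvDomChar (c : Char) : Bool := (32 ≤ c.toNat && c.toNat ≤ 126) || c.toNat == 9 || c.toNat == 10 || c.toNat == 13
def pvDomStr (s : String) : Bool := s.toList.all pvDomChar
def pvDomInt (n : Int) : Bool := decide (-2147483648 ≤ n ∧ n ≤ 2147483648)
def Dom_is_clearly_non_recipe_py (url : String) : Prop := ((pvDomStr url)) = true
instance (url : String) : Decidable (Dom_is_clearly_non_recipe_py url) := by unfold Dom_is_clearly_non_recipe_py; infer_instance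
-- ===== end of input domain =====

-- B replaces A's ten independent substring scans by one position-major pass over the lowered URL (alternative decomposition, same cost).


-- ===== PORT A =====
def is_clearly_non_recipe_py (url : String) : Bool :=
  let lower := PySem.Str.lower url
  let bad_parts : List String :=
    ["/search", "/suche", "/tag/", "/tags/", "/category/", "/categories/",
     "/kategorie/", "/kategorien/", "/author/", "/page/"]
  bad_parts.any (fun part => PySem.Str.isIn part lower)

-- ===== PORT B =====
def pvBadParts : List (List Char) :=
  ["/search".toList, "/suche".toList, "/tag/".toList, "/tags/".toList,
   "/category/".toList, "/categories/".toList, "/kategorie/".toList,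
   "/kategorien/".toList, "/author/".toList, "/page/".toList]

-- the index loop 'for i in range(len(lower))' transcribed as structural recursion over the suffixes
def pvScan : List Char → Bool
  | [] => false
  | c :: t => pvBadParts.any (fun p => p.isPrefixOf (c :: t)) || pvScan t

def is_clearly_non_recipe_py_alt (url : String) : Bool :=
  pvScan (PySem.Str.lower url).toList

-- ===== PRECONDITION & SPEC =====
def Spec_is_clearly_non_recipe_py (url : String) (out : Bool) : Prop := out = is_clearly_non_recipe_py_alt url
instance (url : String) (out : Bool) : Decidable (Spec_is_clearly_non_recipe_py url out) := by unfold Spec_is_clearly_non_recipe_py; infer_instance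

-- ===== CLAIM (what is proved, stated in full; the proofs are below) =====
def Claim_equal_is_clearly_non_recipe_py : Prop := ∀ (url : String), Dom_is_clearly_non_recipe_py url → Spec_is_clearly_non_recipe_py url (is_clearly_non_recipe_py url)

-- ===== LEMMAS AND PROOFS =====

lemma pvScan_iff (s : List Char) :
    pvScan s = true ↔ ∃ p ∈ pvBadParts, p <:+: s := by
  induction s with
  | nil =>
    simp only [pvScan]
    rw [Bool.false_eq_true, false_iff]
    rintro ⟨p, hp, hinf⟩
    have hnil : p = [] := List.eq_nil_of_infix_nil hinf
    subst hnil
    revert hp; decide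
  | cons c t ih =>
    simp only [pvScan, Bool.or_eq_true, List.any_eq_true, ih]
    constructor
    · rintro (⟨p, hp, hpre⟩ | ⟨p, hp, hinf⟩)
      · exact ⟨p, hp, ((List.isPrefixOf_iff_prefix).mp hpre).isInfix⟩
      · exact ⟨p, hp, hinf.trans (List.suffix_cons c t).isInfix⟩
    · rintro ⟨p, hp, hinf⟩
      rcases List.infix_cons_iff.mp hinf with hpre | hinf'
      · exact Or.inl ⟨p, hp, (List.isPrefixOf_iff_prefix).mpr hpre⟩
      · exact Or.inr ⟨p, hp, hinf'⟩

-- ===== VERDICT (by name: the statement is the Claim_ definition above) =====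
theorem is_clearly_non_recipe_py_spec : Claim_equal_is_clearly_non_recipe_py := by
  intro url _
  unfold Spec_is_clearly_non_recipe_py is_clearly_non_recipe_py is_clearly_non_recipe_py_alt
  apply Bool.eq_iff_iff.mpr
  rw [pvScan_iff, List.any_eq_true]
  constructor
  · rintro ⟨part, hpart, hin⟩
    refine ⟨part.toList, ?_, (PySem.Str.isIn_iff_infix _ _).mp hin⟩
    fin_cases hpart <;> simp [pvBadParts]
  · rintro ⟨p, hp, hinf⟩
    fin_cases hp <;>
      exact ⟨_, by simp, (PySem.Str.isIn_iff_infix _ _).mpr hinf⟩
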